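-- pv_equiv track=rewrite | github.com/20kdc/c3ds-projects | caosproxy/tools/libs16.py | dither_point_first_list
-- ===== SOURCE A (Python) =====
-- def dither_point_first_list(points: list):
-- 	"""
-- 	Given a list of 0-255 ints, creates a list giving the index to the first
-- 	instance of a given number.
-- 	"""
-- 	lst = []
-- 	last_value = -1
-- 	last_index = -1
-- 	idx = 0
-- 	for v in points:
-- 		if v != last_value:
-- 			lst.append(idx)
-- 			last_value = v
-- 			last_index = idx
-- 		else:
-- 			lst.append(last_index)
-- 		idx += 1
-- 	return lst
-- ===== SOURCE B (Python) =====
-- def dither_point_first_list(points: list):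
-- 	"""
-- 	Given a list of 0-255 ints, creates a list giving the index to the first
-- 	instance of a given number.
-- 	"""
-- 	result = []
-- 	n = len(points)
-- 	i = 0
-- 	while i < n:
-- 		v = points[i]
-- 		j = i + 1
-- 		while j < n and points[j] == v:
-- 			j += 1
-- 		result.extend([i] * (j - i))
-- 		i = j
-- 	return result
-- ===== Notes on version B (the rewrite author's own statement) =====
-- stated objective: alternative
-- what changed: Replaces A's element-wise state machine (last_value/last_index sentinels) with a run-based two-pointer scan: measure each consecutive run, emit its start index run-length times, advance past the run.
-- intended difference: On lists whose first element is -1, A's sentinel last_value=-1 matches and A returns -1 as the 'first index' of the leading run, while B returns the intended index 0; an index of -1 is evidently wrong for the function's purpose. — e.g. on dither_point_first_list([-1, -1, 3]): A returns [-1, -1, 2], B returns [0, 0, 2]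
import Mathlib
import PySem

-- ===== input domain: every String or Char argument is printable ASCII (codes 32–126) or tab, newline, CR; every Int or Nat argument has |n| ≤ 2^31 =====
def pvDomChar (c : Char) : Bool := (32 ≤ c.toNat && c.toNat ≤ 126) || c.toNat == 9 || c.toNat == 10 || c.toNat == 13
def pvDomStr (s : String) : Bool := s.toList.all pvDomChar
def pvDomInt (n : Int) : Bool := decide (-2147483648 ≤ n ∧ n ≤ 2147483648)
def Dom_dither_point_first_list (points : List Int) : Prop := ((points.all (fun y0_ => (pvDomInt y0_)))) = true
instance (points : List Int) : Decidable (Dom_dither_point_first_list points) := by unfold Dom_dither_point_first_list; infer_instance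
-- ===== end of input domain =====

-- B replaces A's element-wise sentinel state machine by an index-based run scan (emit each
-- run's start index run-length times); on lists starting with -1 A's sentinel leaks and B
-- returns the intended index 0 instead (see D_ below). Objective: alternative (same O(n) cost).


-- ===== PORT A =====
-- state = (lst, last_value, last_index, idx), exactly A's four locals
def pvAStep (s : List Int × Int × Int × Int) (v : Int) : List Int × Int × Int × Int :=
  let (lst, last_value, last_index, idx) := s
  if v ≠ last_value then (lst ++ [idx], v, idx, idx + 1)
  else (lst ++ [last_index], last_value, last_index, idx + 1)

def dither_point_first_list (points : List Int) : List Int :=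
  (points.foldl pvAStep ([], -1, -1, 0)).1

-- ===== PORT B =====
-- inner while loop of Source B: advance j past the run of v; the fuel argument is only a
-- totality guard (always called with enough fuel to cover the remaining suffix);
-- the j < n guard makes points.getD exact where Source B reads points[j] with j < n
def pvRunEnd (points : List Int) (v : Int) : Nat → Nat → Nat
  | 0, j => j
  | fuel + 1, j =>
    if j < points.length && points.getD j 0 == v then pvRunEnd points v fuel (j + 1) else j

-- outer while loop of Source B over (result, i); fuel is again only a totality guard
def pvBGo (points : List Int) : Nat → Nat → List Int
  | 0, _ => []
  | fuel + 1, i =>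
    if i < points.length then
      let v := points.getD i 0
      let j := pvRunEnd points v (points.length - (i + 1)) (i + 1)
      List.replicate (j - i) (i : Int) ++ pvBGo points fuel j
    else []

def dither_point_first_list_alt (points : List Int) : List Int :=
  pvBGo points points.length 0

-- ===== PRECONDITION & SPEC =====
-- On lists whose first element is -1 (outside the docstring's 0-255 domain), A's sentinel
-- last_value = -1 matches and A returns -1 as the "first index" of the leading run, while B
-- returns the intended index 0.
def D_dither_point_first_list (points : List Int) : Prop := points.head? = some (-1)
instance (points : List Int) : Decidable (D_dither_point_first_list points) := by unfold D_dither_point_first_list; infer_instance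
def Spec_dither_point_first_list (points : List Int) (out : List Int) : Prop := ¬ D_dither_point_first_list points → out = dither_point_first_list_alt points
instance (points : List Int) (out : List Int) : Decidable (Spec_dither_point_first_list points out) := by unfold Spec_dither_point_first_list; infer_instance
def pvDiffWitness_dither_point_first_list : List Int := [-1, -1, 3]
def pvDiffWitnessOut_dither_point_first_list : (List Int) × (List Int) := ([-1, -1, 2], [0, 0, 2])

-- ===== CLAIM (what is proved, stated in full; the proofs are below) =====
def Claim_unchanged_dither_point_first_list : Prop := ∀ (points : List Int), Dom_dither_point_first_list points → Spec_dither_point_first_list points (dither_point_first_list points)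
def Claim_changed_dither_point_first_list : Prop := Dom_dither_point_first_list (pvDiffWitness_dither_point_first_list) ∧ D_dither_point_first_list (pvDiffWitness_dither_point_first_list) ∧ dither_point_first_list (pvDiffWitness_dither_point_first_list) = pvDiffWitnessOut_dither_point_first_list.1 ∧ dither_point_first_list_alt (pvDiffWitness_dither_point_first_list) = pvDiffWitnessOut_dither_point_first_list.2 ∧ pvDiffWitnessOut_dither_point_first_list.1 ≠ pvDiffWitnessOut_dither_point_first_list.2
def Claim_exact_dither_point_first_list : Prop := ∀ (points : List Int), Dom_dither_point_first_list points → D_dither_point_first_list points → dither_point_first_list points ≠ dither_point_first_list_alt points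

-- ===== LEMMAS AND PROOFS =====

-- proof-only bridge: length of the run of v at the front of l
def pvCountRun (v : Int) : List Int → Nat
  | [] => 0
  | x :: xs => if x == v then 1 + pvCountRun v xs else 0

-- proof-only bridge: the run decomposition both ports compute, list-structurally
def pvAltGo (start : Int) : List Int → List Int
  | [] => []
  | v :: tail =>
    let run : Nat := 1 + pvCountRun v tail
    List.replicate run start ++ pvAltGo (start + run) (tail.drop (pvCountRun v tail))
termination_by l => l.length
decreasing_by simp [List.length_drop]

theorem pvAltGo_nil (start : Int) : pvAltGo start [] = [] := by rw [pvAltGo.eq_def]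

theorem pvAltGo_cons (start v : Int) (tail : List Int) :
    pvAltGo start (v :: tail) =
      List.replicate (1 + pvCountRun v tail) start ++
        pvAltGo (start + (1 + pvCountRun v tail : Nat)) (tail.drop (pvCountRun v tail)) := by
  rw [pvAltGo.eq_def]

theorem pvCountRun_self (v : Int) (xs : List Int) :
    pvCountRun v (v :: xs) = pvCountRun v xs + 1 := by
  simp [pvCountRun, Nat.add_comm]

theorem pvCountRun_ne {x v : Int} (h : x ≠ v) (xs : List Int) :
    pvCountRun v (x :: xs) = 0 := by
  simp [pvCountRun, h]

theorem pvAStep_eq (lst : List Int) (v i j : Int) :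
    pvAStep (lst, v, i, j) v = (lst ++ [i], v, i, j + 1) := by
  simp [pvAStep]

theorem pvAStep_ne {x v : Int} (h : x ≠ v) (lst : List Int) (i j : Int) :
    pvAStep (lst, v, i, j) x = (lst ++ [j], x, j, j + 1) := by
  simp [pvAStep, h]

-- A's accumulator only grows by appending
theorem pvA_acc (l : List Int) : ∀ (acc : List Int) (v i j : Int),
    (l.foldl pvAStep (acc, v, i, j)).1 = acc ++ (l.foldl pvAStep ([], v, i, j)).1 := by
  induction l with
  | nil => intro acc v i j; simp
  | cons x xs ih =>
    intro acc v i j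
    by_cases h : x = v
    · subst h
      rw [List.foldl_cons, List.foldl_cons, pvAStep_eq, pvAStep_eq,
        ih (acc ++ [i]), ih ([] ++ [i])]
      simp
    · rw [List.foldl_cons, List.foldl_cons, pvAStep_ne h, pvAStep_ne h,
        ih (acc ++ [j]), ih ([] ++ [j])]
      simp

-- core invariant for A: mid-run with last_value = v, last_index = i, current index j,
-- A emits i for the remainder of the run and then behaves like the run decomposition
theorem pvA_run (l : List Int) : ∀ (v i j : Int),
    (l.foldl pvAStep ([], v, i, j)).1 =
      List.replicate (pvCountRun v l) i ++ pvAltGo (j + pvCountRun v l) (l.drop (pvCountRun v l)) := by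
  induction l with
  | nil => intro v i j; simp [pvCountRun, pvAltGo_nil]
  | cons x xs ih =>
    intro v i j
    by_cases h : x = v
    · subst h
      rw [List.foldl_cons, pvAStep_eq, pvA_acc, ih, pvCountRun_self]
      have hc : (j : Int) + ((pvCountRun x xs + 1 : Nat) : Int) = j + 1 + pvCountRun x xs := by
        push_cast; ring
      rw [hc, List.replicate_succ, List.drop_succ_cons]
      simp
    · rw [List.foldl_cons, pvAStep_ne h, pvA_acc, ih, pvCountRun_ne h]
      simp only [Nat.cast_zero, add_zero, List.replicate_zero, List.nil_append, List.drop_zero]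
      rw [pvAltGo_cons]
      have hc : (j : Int) + ((1 + pvCountRun x xs : Nat) : Int) = j + 1 + pvCountRun x xs := by
        push_cast; ring
      rw [hc, Nat.add_comm 1 (pvCountRun x xs), List.replicate_succ]
      simp

-- B's inner while computes j = start + run length of v in the suffix (given enough fuel)
theorem pvRunEnd_eq (points : List Int) (v : Int) :
    ∀ (fuel j : Nat), points.length ≤ j + fuel →
      pvRunEnd points v fuel j = j + pvCountRun v (points.drop j) := by
  intro fuel
  induction fuel with
  | zero =>
    intro j hf
    rw [List.drop_of_length_le (by omega)]
    simp [pvRunEnd, pvCountRun]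
  | succ fuel ih =>
    intro j hf
    rw [pvRunEnd]
    split_ifs with h
    · simp only [Bool.and_eq_true, decide_eq_true_eq] at h
      obtain ⟨hj, hv⟩ := h
      rw [ih (j + 1) (by omega)]
      rw [List.drop_eq_getElem_cons hj]
      have hg : points.getD j 0 = points[j] := List.getD_eq_getElem points 0 hj
      rw [hg] at hv
      rw [show points[j] = v from by simpa using hv, pvCountRun_self]
      omega
    · simp only [Bool.and_eq_true, decide_eq_true_eq, not_and] at h
      rcases Nat.lt_or_ge j points.length with hj | hj
      · have hv := h hj
        rw [List.drop_eq_getElem_cons hj]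
        have hg : points.getD j 0 = points[j] := List.getD_eq_getElem points 0 hj
        rw [pvCountRun_ne (by rw [← hg]; simpa using hv)]
        omega
      · rw [List.drop_of_length_le hj]
        simp [pvCountRun]

-- B's outer while loop is the run decomposition of the remaining suffix (given enough fuel)
theorem pvBGo_eq (points : List Int) :
    ∀ (fuel i : Nat), points.length ≤ i + fuel →
      pvBGo points fuel i = pvAltGo (i : Int) (points.drop i) := by
  intro fuel
  induction fuel with
  | zero =>
    intro i hf
    rw [List.drop_of_length_le (by omega)]
    simp [pvBGo, pvAltGo_nil]
  | succ fuel ih =>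
    intro i hf
    rw [pvBGo]
    split_ifs with h
    · dsimp only
      have hre := pvRunEnd_eq points (points.getD i 0) (points.length - (i + 1)) (i + 1)
        (by omega)
      have hge : i + 1 ≤ pvRunEnd points (points.getD i 0) (points.length - (i + 1)) (i + 1) := by
        omega
      rw [ih _ (by omega)]
      rw [hre]
      rw [List.drop_eq_getElem_cons h]
      have hg : points.getD i 0 = points[i] := List.getD_eq_getElem points 0 h
      rw [hg, pvAltGo_cons]
      have hdrop : (points.drop (i + 1)).drop (pvCountRun points[i] (points.drop (i + 1))) =
          points.drop (i + 1 + pvCountRun points[i] (points.drop (i + 1))) := by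
        rw [List.drop_drop]
      rw [hdrop]
      rw [hg] at hre
      congr 1
      · congr 1; omega
      · congr 1; push_cast; ring
    · rw [List.drop_of_length_le (by omega), pvAltGo_nil]

theorem pvAlt_eq (points : List Int) :
    dither_point_first_list_alt points = pvAltGo 0 points := by
  unfold dither_point_first_list_alt
  rw [pvBGo_eq points points.length 0 (by omega)]
  simp

theorem dither_point_first_list_spec : Claim_unchanged_dither_point_first_list := by
  intro points _ hD
  unfold dither_point_first_list
  rw [pvAlt_eq, pvA_run]
  have hc : pvCountRun (-1) points = 0 := by
    cases points with
    | nil => rfl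
    | cons x xs =>
      unfold D_dither_point_first_list at hD
      simp only [List.head?_cons, Option.some_inj] at hD
      exact pvCountRun_ne (by simpa using hD) xs
  simp [hc]

theorem dither_point_first_list_changed : Claim_changed_dither_point_first_list := by
  unfold Claim_changed_dither_point_first_list
  refine ⟨by decide, by decide, by decide, ?_, by decide⟩
  show dither_point_first_list_alt [-1, -1, 3] = [0, 0, 2]
  rw [pvAlt_eq]
  norm_num [pvAltGo_cons, pvAltGo_nil, pvCountRun, List.replicate]

theorem dither_point_first_list_tight : Claim_exact_dither_point_first_list := by
  intro points _ hD
  cases points with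
  | nil => simp [D_dither_point_first_list] at hD
  | cons x xs =>
    unfold D_dither_point_first_list at hD
    simp only [List.head?_cons, Option.some_inj] at hD
    subst hD
    intro heq
    have hA : (dither_point_first_list ((-1) :: xs)).head? = some (-1) := by
      unfold dither_point_first_list
      rw [pvA_run, pvCountRun_self, List.replicate_succ]
      simp
    have hB : (dither_point_first_list_alt ((-1) :: xs)).head? = some 0 := by
      rw [pvAlt_eq, pvAltGo_cons, Nat.add_comm 1 (pvCountRun (-1) xs), List.replicate_succ]
      simp
    rw [heq, hB] at hA
    exact absurd (Option.some_inj.mp hA) (by norm_num)
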